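-- pv_equiv track=rewrite | github.com/Atlas-KuK/mein-erstes-projekt | plaud_processor/protocol_templates.py | _format_segments_for_prompt
-- ===== SOURCE A (Python) =====
-- def _format_segments_for_prompt(segments: list) -> str:
--     """Formatiert Segmente als lesbaren Text mit Sprechern."""
--     lines = []
--     current_speaker = None
--     for seg in segments:
--         speaker = seg.get("speaker", "Unbekannt")
--         text = seg.get("text", "").strip()
--         if not text:
--             continue
--         if speaker != current_speaker:
--             lines.append(f"\n**{speaker}:** {text}")
--             current_speaker = speaker
--         else:
--             lines.append(text)
--     return "\n".join(lines)
-- ===== SOURCE B (Python) =====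
-- def _format_segments_for_prompt(segments: list) -> str:
--     """Formatiert Segmente als lesbaren Text mit Sprechern."""
--     items = [(seg.get("speaker", "Unbekannt"), seg.get("text", "").strip())
--              for seg in segments]
--     items = [(sp, tx) for (sp, tx) in items if tx]
--     lines = []
--     while items:
--         sp, tx = items[0]
--         k = 1
--         while k < len(items) and items[k][0] == sp:
--             k += 1
--         lines.append(f"\n**{sp}:** {tx}")
--         lines.extend(t for (_, t) in items[1:k])
--         items = items[k:]
--     return "\n".join(lines)
-- ===== Notes on version B (the rewrite author's own statement) =====
-- stated objective: alternative
-- what changed: Replaces the stateful current_speaker loop with a two-phase pipeline: first map/filter segments to non-empty (speaker, text) pairs, then group consecutive same-speaker runs explicitly and emit a header per run.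
import Mathlib
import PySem

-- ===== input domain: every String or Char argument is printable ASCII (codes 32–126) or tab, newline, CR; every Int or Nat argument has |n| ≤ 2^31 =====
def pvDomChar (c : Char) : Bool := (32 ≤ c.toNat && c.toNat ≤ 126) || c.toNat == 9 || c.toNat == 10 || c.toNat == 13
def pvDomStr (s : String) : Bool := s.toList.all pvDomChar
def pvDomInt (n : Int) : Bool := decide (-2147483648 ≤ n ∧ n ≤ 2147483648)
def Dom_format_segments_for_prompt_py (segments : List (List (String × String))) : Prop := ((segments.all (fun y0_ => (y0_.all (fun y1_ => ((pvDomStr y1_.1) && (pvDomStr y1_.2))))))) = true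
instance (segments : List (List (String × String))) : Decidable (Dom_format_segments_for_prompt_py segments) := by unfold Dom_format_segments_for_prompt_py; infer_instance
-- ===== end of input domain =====

-- B formats the same text via a map/filter pre-pass and explicit consecutive-speaker grouping
-- instead of A's stateful current_speaker loop (objective: alternative decomposition).

-- ===== PORT A =====
-- one step of A's for-loop over (lines, current_speaker)
def pvStepA (st : List String × Option String) (seg : List (String × String)) :
    List String × Option String :=
  let speaker := PySem.Dict.getD (PySem.Dict.mk seg) "speaker" "Unbekannt"
  let text := PySem.Str.strip (PySem.Dict.getD (PySem.Dict.mk seg) "text" "")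
  if text = "" then st
  else if some speaker ≠ st.2 then
    (st.1 ++ ["\n**" ++ speaker ++ ":** " ++ text], some speaker)
  else
    (st.1 ++ [text], st.2)

def format_segments_for_prompt_py (segments : List (List (String × String))) : String :=
  PySem.Str.join "\n" (segments.foldl pvStepA ([], none)).1

-- ===== PORT B =====
-- Source B: items = non-empty (speaker, stripped text) pairs
def pvPairs (segments : List (List (String × String))) : List (String × String) :=
  (segments.map (fun seg =>
    (PySem.Dict.getD (PySem.Dict.mk seg) "speaker" "Unbekannt",
     PySem.Str.strip (PySem.Dict.getD (PySem.Dict.mk seg) "text" "")))).filter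
    (fun p => p.2 ≠ "")

-- Source B's outer while loop: peel one consecutive same-speaker run per iteration
def pvGroups : List (String × String) → List String
  | [] => []
  | (sp, tx) :: rest =>
      ("\n**" ++ sp ++ ":** " ++ tx) ::
        ((rest.takeWhile (fun p => p.1 == sp)).map Prod.snd ++
          pvGroups (rest.dropWhile (fun p => p.1 == sp)))
termination_by items => items.length
decreasing_by
  simp only [List.length_cons]
  exact Nat.lt_succ_of_le (List.length_dropWhile_le _ _)

def format_segments_for_prompt_py_alt (segments : List (List (String × String))) : String :=
  PySem.Str.join "\n" (pvGroups (pvPairs segments))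

-- ===== PRECONDITION & SPEC =====
def Spec_format_segments_for_prompt_py (segments : List (List (String × String))) (out : String) : Prop := out = format_segments_for_prompt_py_alt segments
instance (segments : List (List (String × String))) (out : String) : Decidable (Spec_format_segments_for_prompt_py segments out) := by unfold Spec_format_segments_for_prompt_py; infer_instance

-- ===== CLAIM (what is proved, stated in full; the proofs are below) =====
def Claim_equal_format_segments_for_prompt_py : Prop := ∀ (segments : List (List (String × String))), Dom_format_segments_for_prompt_py segments → Spec_format_segments_for_prompt_py segments (format_segments_for_prompt_py segments)

-- ===== LEMMAS AND PROOFS =====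

-- A's loop step restricted to the already-extracted non-empty pairs
def pvCore (st : List String × Option String) (p : String × String) :
    List String × Option String :=
  if some p.1 ≠ st.2 then
    (st.1 ++ ["\n**" ++ p.1 ++ ":** " ++ p.2], some p.1)
  else
    (st.1 ++ [p.2], st.2)

-- A's fold over raw segments equals the pvCore fold over the filtered pairs
theorem foldA_eq_core (segments : List (List (String × String)))
    (st : List String × Option String) :
    segments.foldl pvStepA st = (pvPairs segments).foldl pvCore st := by
  induction segments generalizing st with
  | nil => rfl
  | cons seg rest ih =>
      by_cases h : PySem.Str.strip (PySem.Dict.getD (PySem.Dict.mk seg) "text" "") = ""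
      · have hstep : pvStepA st seg = st := by simp [pvStepA, h]
        simp only [pvPairs, List.map_cons, List.filter_cons] at *
        simp only [List.foldl_cons, hstep, decide_eq_true_eq]
        simpa [h] using ih st
      · have hstep : pvStepA st seg = pvCore st
            (PySem.Dict.getD (PySem.Dict.mk seg) "speaker" "Unbekannt",
             PySem.Str.strip (PySem.Dict.getD (PySem.Dict.mk seg) "text" "")) := by
          simp [pvStepA, pvCore, h]
        simp only [pvPairs, List.map_cons, List.filter_cons] at *
        simp only [List.foldl_cons, hstep, decide_eq_true_eq]
        rw [if_pos (by simpa using h)]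
        simp only [List.foldl_cons]
        exact ih _

-- consuming one same-speaker run leaves the fold at the run's end
theorem core_run (rest : List (String × String)) (sp : String) (lines : List String) :
    rest.foldl pvCore (lines, some sp) =
      (rest.dropWhile (fun p => p.1 == sp)).foldl pvCore
        (lines ++ (rest.takeWhile (fun p => p.1 == sp)).map Prod.snd, some sp) := by
  induction rest generalizing lines with
  | nil => simp
  | cons p rest ih =>
      by_cases h : p.1 = sp
      · have hb : (p.1 == sp) = true := by simpa using h
        simp only [List.foldl_cons, List.takeWhile_cons, List.dropWhile_cons, hb]
        have hstep : pvCore (lines, some sp) p = (lines ++ [p.2], some sp) := by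
          simp [pvCore, h]
        rw [hstep, ih]
        simp
      · have hb : (p.1 == sp) = false := by simpa using h
        simp [hb]

-- main invariant: when the current speaker differs from the head's speaker,
-- A's fold appends exactly B's grouped lines
theorem core_eq_groups (items : List (String × String)) (cur : Option String)
    (lines : List String) (h : ∀ p, items.head? = some p → some p.1 ≠ cur) :
    (items.foldl pvCore (lines, cur)).1 = lines ++ pvGroups items := by
  induction hn : items.length using Nat.strong_induction_on generalizing items cur lines with
  | _ n ih =>
    match items with
    | [] => simp [pvGroups]
    | (sp, tx) :: rest =>
        have hne : some sp ≠ cur := h (sp, tx) rfl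
        have hstep : pvCore (lines, cur) (sp, tx) =
            (lines ++ ["\n**" ++ sp ++ ":** " ++ tx], some sp) := by
          simp [pvCore, hne]
        simp only [List.foldl_cons, hstep]
        rw [core_run]
        have hlt : (rest.dropWhile (fun p => p.1 == sp)).length < n := by
          subst hn
          simp only [List.length_cons]
          exact Nat.lt_succ_of_le (List.length_dropWhile_le _ _)
        have hhd : ∀ p, (rest.dropWhile (fun p => p.1 == sp)).head? = some p →
            some p.1 ≠ some sp := by
          intro p hp
          have := List.head?_dropWhile_not (fun p => p.1 == sp) rest
          rw [hp] at this
          simp only [] at this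
          intro hcontra
          simp_all
        rw [ih _ hlt _ _ _ hhd rfl]
        simp [pvGroups]

-- ===== VERDICT (by name: the statement is the Claim_ definition above) =====
theorem format_segments_for_prompt_py_spec : Claim_equal_format_segments_for_prompt_py := by
  intro segments _
  unfold Spec_format_segments_for_prompt_py format_segments_for_prompt_py
    format_segments_for_prompt_py_alt
  rw [foldA_eq_core]
  rw [core_eq_groups (pvPairs segments) none [] (by intro p _; exact Option.some_ne_none _)]
  simp
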